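-- pv_equiv track=rewrite | github.com/jianershi/algorithm | lintcode/543.4.py | KthInArrays
-- ===== SOURCE A (Python) =====
-- import heapq
--
-- def KthInArrays(arrays, k):
--     # write your code here
--     n = len(arrays)
--     pt = [0] * n
--     for arr in arrays:
--         arr.sort(reverse = True)
--
--     heap = []
--     for i in range(n):
--         if pt[i] < len(arrays[i]):
--             heap.append((-arrays[i][pt[i]], i))
--     heapq.heapify(heap)
--
--     for _ in range(k):
--         neg_max, arr_idx = heapq.heappop(heap)
--         pt[arr_idx] += 1
--         if pt[arr_idx] < len(arrays[arr_idx]):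
--             heapq.heappush(heap, (-arrays[arr_idx][pt[arr_idx]], arr_idx))
--
--     return -neg_max
-- ===== SOURCE B (Python) =====
-- def KthInArrays(arrays, k):
--     flat = sorted((x for arr in arrays for x in arr), reverse=True)
--     return flat[k - 1]
-- ===== Notes on version B (the rewrite author's own statement) =====
-- stated objective: alternative
-- what changed: Replaces per-array in-place descending sorts plus a k-step heap-merge (k heappop/heappush rounds with pointer bookkeeping) by one global sort of the flattened elements indexed at k-1; unlike A, B does not mutate the input arrays.
import Mathlib
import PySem

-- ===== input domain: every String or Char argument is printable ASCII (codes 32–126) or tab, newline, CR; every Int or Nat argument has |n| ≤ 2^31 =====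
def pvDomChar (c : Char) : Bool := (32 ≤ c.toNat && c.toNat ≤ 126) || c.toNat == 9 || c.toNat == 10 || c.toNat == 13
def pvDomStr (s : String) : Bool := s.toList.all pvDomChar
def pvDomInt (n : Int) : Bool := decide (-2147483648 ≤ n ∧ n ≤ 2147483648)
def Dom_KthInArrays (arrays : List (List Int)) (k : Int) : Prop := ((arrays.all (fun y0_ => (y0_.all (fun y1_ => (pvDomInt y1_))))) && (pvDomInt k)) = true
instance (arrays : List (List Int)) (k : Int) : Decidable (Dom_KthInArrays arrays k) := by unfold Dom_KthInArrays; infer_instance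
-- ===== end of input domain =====

-- B replaces A's per-array sorts plus k-round heap merge by one global descending sort
-- indexed at k-1; the equivalence is about the RETURN value only: A sorts the inner
-- lists of `arrays` in place, B does not mutate its argument.

-- ===== PORT A =====
-- heapq is ported at the level of its library contract: the heap is a plain list,
-- heapify is the identity, heappush appends, heappop extracts the lexicographically
-- smallest pair.  Exact for A's use: A observes the heap only through the sequence of
-- popped pairs, which the heap's multiset determines.
def pvHeapPick (m y : Int × Int) : Int × Int :=
  if y.1 < m.1 ∨ (y.1 = m.1 ∧ y.2 < m.2) then y else m

def pvHeapMin : List (Int × Int) → Option (Int × Int)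
  | [] => none
  | x :: xs => some (xs.foldl pvHeapPick x)

-- 'for i in range(n): if pt[i] < len(arrays[i]): heap.append((-arrays[i][pt[i]], i))'
def pvFronts (rem : List (List Int)) : List (Int × Int) :=
  (PySem.List.enumerate rem 0).filterMap (fun p => p.2.head?.map (fun x => (-x, p.1)))

-- the 'for _ in range(k)' loop; pt[i] is represented by the remaining suffix rem[i] of
-- the i-th sorted array (pt[arr_idx] += 1 = drop the head); none = A raises (IndexError
-- popping an empty heap, NameError on k <= 0 when neg_max is never bound)
def pvKthLoop : Nat → List (List Int) → List (Int × Int) → Option Int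
  | 0, _, _ => none
  | n + 1, rem, heap =>
    match pvHeapMin heap with
    | none => none
    | some (nm, i) =>
      let heap1 := heap.erase (nm, i)
      let r := (rem.getD i.toNat []).tail
      let rem' := rem.set i.toNat r
      let heap2 := match r with
        | [] => heap1
        | x :: _ => heap1 ++ [(-x, i)]
      match n with
      | 0 => some (-nm)
      | m + 1 => pvKthLoop (m + 1) rem' heap2

def KthInArrays (arrays : List (List Int)) (k : Int) : Int :=
  let arrs := arrays.map (fun a => PySem.List.sorted a (fun x => x) true)
  (pvKthLoop k.toNat arrs (pvFronts arrs)).getD 0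

-- ===== PORT B =====
def KthInArrays_alt (arrays : List (List Int)) (k : Int) : Int :=
  let flat := PySem.List.sorted (arrays.flatMap (fun arr => arr)) (fun x => x) true
  (PySem.List.pyGet? flat (k - 1)).getD 0

-- ===== PRECONDITION & SPEC =====
-- exactly the inputs on which A returns: k ≤ 0 leaves neg_max unbound (NameError) and
-- k beyond the total element count pops an empty heap (IndexError)
def Pre_KthInArrays (arrays : List (List Int)) (k : Int) : Prop :=
  1 ≤ k ∧ k ≤ (arrays.map (fun a => (a.length : Int))).sum
instance (arrays : List (List Int)) (k : Int) : Decidable (Pre_KthInArrays arrays k) := by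
  unfold Pre_KthInArrays; infer_instance

def pvWitness_KthInArrays : List (List Int) × Int := ([[3, 1], [2]], 2)

def Spec_KthInArrays (arrays : List (List Int)) (k : Int) (out : Int) : Prop := out = KthInArrays_alt arrays k
instance (arrays : List (List Int)) (k : Int) (out : Int) : Decidable (Spec_KthInArrays arrays k out) := by unfold Spec_KthInArrays; infer_instance

-- ===== CLAIM (what is proved, stated in full; the proofs are below) =====
def Claim_equal_KthInArrays : Prop := ∀ (arrays : List (List Int)) (k : Int), Dom_KthInArrays arrays k → Pre_KthInArrays arrays k → Spec_KthInArrays arrays k (KthInArrays arrays k)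

-- ===== LEMMAS AND PROOFS =====

theorem pvHeapPick_cases (x z : Int × Int) : pvHeapPick x z = x ∨ pvHeapPick x z = z := by
  unfold pvHeapPick; split
  · exact Or.inr rfl
  · exact Or.inl rfl

theorem pvHeapPick_le (x z : Int × Int) :
    (pvHeapPick x z).1 ≤ x.1 ∧ (pvHeapPick x z).1 ≤ z.1 := by
  unfold pvHeapPick; split <;> rename_i hc
  · rcases hc with h | h
    · exact ⟨le_of_lt h, le_refl _⟩
    · exact ⟨le_of_eq h.1, le_refl _⟩
  · refine ⟨le_refl _, ?_⟩
    rcases not_or.mp hc with ⟨h1, _⟩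
    omega

theorem pvHeapPick_foldl_spec (xs : List (Int × Int)) (x : Int × Int) :
    xs.foldl pvHeapPick x ∈ x :: xs ∧ (xs.foldl pvHeapPick x).1 ≤ x.1 ∧
      ∀ y ∈ xs, (xs.foldl pvHeapPick x).1 ≤ y.1 := by
  induction xs generalizing x with
  | nil => simp
  | cons z zs ih =>
    obtain ⟨hmem, hle, hall⟩ := ih (pvHeapPick x z)
    obtain ⟨hl1, hl2⟩ := pvHeapPick_le x z
    refine ⟨?_, ?_, ?_⟩
    · simp only [List.foldl_cons]
      rcases List.mem_cons.mp hmem with h | h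
      · rcases pvHeapPick_cases x z with hp | hp
        · rw [h, hp]; exact List.mem_cons_self
        · rw [h, hp]; exact List.mem_cons_of_mem _ List.mem_cons_self
      · exact List.mem_cons_of_mem _ (List.mem_cons_of_mem _ h)
    · simpa only [List.foldl_cons] using hle.trans hl1
    · intro y hy
      simp only [List.foldl_cons]
      rcases List.mem_cons.mp hy with h | h
      · exact h ▸ (hle.trans hl2)
      · exact hall y h

theorem pvHeapMin_spec (h : List (Int × Int)) (m : Int × Int) (hm : pvHeapMin h = some m) :
    m ∈ h ∧ ∀ y ∈ h, m.1 ≤ y.1 := by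
  cases h with
  | nil => simp [pvHeapMin] at hm
  | cons x xs =>
    simp only [pvHeapMin, Option.some.injEq] at hm
    obtain ⟨hmem, hle, hall⟩ := pvHeapPick_foldl_spec xs x
    rw [hm] at hmem hle hall
    refine ⟨hmem, fun y hy => ?_⟩
    rcases List.mem_cons.mp hy with h | h
    · exact h ▸ hle
    · exact hall y h

theorem pvFronts_mem_iff (rem : List (List Int)) (p : Int × Int) :
    p ∈ pvFronts rem ↔ ∃ (j : Nat) (h : j < rem.length) (x : Int) (r : List Int),
      rem[j] = x :: r ∧ p = (-x, (j : Int)) := by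
  unfold pvFronts
  rw [List.mem_filterMap]
  constructor
  · rintro ⟨a, ha, hfa⟩
    rw [PySem.List.mem_enumerate_iff] at ha
    obtain ⟨j, hj, rfl⟩ := ha
    cases hl : rem[j] with
    | nil => simp [hl] at hfa
    | cons x r =>
      refine ⟨j, hj, x, r, hl, ?_⟩
      simp only [hl, List.head?_cons, Option.map_some, Option.some.injEq] at hfa
      rw [← hfa]
      simp
  · rintro ⟨j, hj, x, r, hl, rfl⟩
    refine ⟨((j : Int), rem[j]), ?_, ?_⟩
    · rw [PySem.List.mem_enumerate_iff]
      exact ⟨j, hj, by simp⟩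
    · simp [hl]

theorem pvDescHead (z : Int) (t : List Int) (hp : (z :: t).Pairwise (fun a b => b ≤ a)) :
    ∀ y ∈ z :: t, y ≤ z := by
  intro y hy
  rcases List.mem_cons.mp hy with h | h
  · exact le_of_eq h
  · exact (List.pairwise_cons.mp hp).1 y h

theorem pvPopMax (rem : List (List Int)) (heap : List (Int × Int)) (nm i : Int)
    (hsorted : ∀ l ∈ rem, l.Pairwise (fun a b => b ≤ a))
    (hheap : heap.Perm (pvFronts rem))
    (hmin : pvHeapMin heap = some (nm, i)) :
    ∀ y ∈ rem.flatten, y ≤ -nm := by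
  intro y hy
  obtain ⟨l, hl, hyl⟩ := List.mem_flatten.mp hy
  obtain ⟨j, hj, hlj⟩ := List.mem_iff_getElem.mp hl
  cases hz : rem[j] with
  | nil => rw [← hlj, hz] at hyl; simp at hyl
  | cons z t =>
    have hfr : (-z, (j : Int)) ∈ pvFronts rem :=
      (pvFronts_mem_iff rem _).mpr ⟨j, hj, z, t, hz, rfl⟩
    have hmem : (-z, (j : Int)) ∈ heap := hheap.mem_iff.mpr hfr
    have hle : nm ≤ -z := (pvHeapMin_spec heap _ hmin).2 _ hmem
    have hyz : y ≤ z := by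
      apply pvDescHead z t
      · rw [← hz]; exact hsorted _ (List.getElem_mem hj)
      · rw [← hz, hlj]; exact hyl
    omega

theorem pvFronts_split (A B : List (List Int)) (c : List Int) :
    pvFronts (A ++ c :: B) =
      (PySem.List.enumerate A 0).filterMap (fun p => p.2.head?.map (fun x => (-x, p.1)))
      ++ ((c.head?.map (fun x => (-x, (A.length : Int)))).toList
      ++ (PySem.List.enumerate B ((A.length : Int) + 1)).filterMap
           (fun p => p.2.head?.map (fun x => (-x, p.1)))) := by
  unfold pvFronts
  rw [PySem.List.enumerate_append, List.filterMap_append, PySem.List.enumerate_cons]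
  cases c <;> simp

theorem pvLoop_spec (n : Nat) : ∀ (rem : List (List Int)) (heap : List (Int × Int)),
    (∀ l ∈ rem, l.Pairwise (fun a b => b ≤ a)) →
    heap.Perm (pvFronts rem) →
    1 ≤ n → n ≤ rem.flatten.length →
    pvKthLoop n rem heap =
      some ((PySem.List.sorted rem.flatten (fun x => x) true).getD (n - 1) 0) := by
  induction n with
  | zero => intro _ _ _ _ h1 _; omega
  | succ n ih =>
    intro rem heap hsorted hheap h1 h2
    have hflat_ne : rem.flatten ≠ [] := by
      intro h; rw [h] at h2; simp at h2
    have hheap_ne : heap ≠ [] := by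
      obtain ⟨y, hy⟩ := List.exists_mem_of_ne_nil _ hflat_ne
      obtain ⟨l, hl, hyl⟩ := List.mem_flatten.mp hy
      obtain ⟨j0, hj0, hlj0⟩ := List.mem_iff_getElem.mp hl
      cases hz : rem[j0] with
      | nil => rw [← hlj0, hz] at hyl; simp at hyl
      | cons z t =>
        have hfr : (-z, (j0 : Int)) ∈ pvFronts rem :=
          (pvFronts_mem_iff rem _).mpr ⟨j0, hj0, z, t, hz, rfl⟩
        exact List.ne_nil_of_mem (hheap.mem_iff.mpr hfr)
    obtain ⟨h0, hs, rfl⟩ := List.exists_cons_of_ne_nil hheap_ne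
    rcases hhp : hs.foldl pvHeapPick h0 with ⟨nm, i⟩
    have hmin : pvHeapMin (h0 :: hs) = some (nm, i) := by
      simp only [pvHeapMin, hhp]
    obtain ⟨hmem, hminle⟩ := pvHeapMin_spec _ _ hmin
    obtain ⟨j, hj, x, r, hxr, hpij⟩ := (pvFronts_mem_iff rem _).mp (hheap.mem_iff.mp hmem)
    have hnm : nm = -x := (Prod.mk.injEq _ _ _ _).mp hpij |>.1
    have hi : i = (j : Int) := (Prod.mk.injEq _ _ _ _).mp hpij |>.2
    subst hnm hi
    have hget : (List.getD rem (Int.toNat (j : Int)) []) = x :: r := by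
      rw [Int.toNat_natCast, List.getD_eq_getElem?_getD, List.getElem?_eq_getElem hj, hxr]
      rfl
    have hmax : ∀ y ∈ rem.flatten, y ≤ x := by
      have hall := pvPopMax rem (h0 :: hs) (-x) (j : Int) hsorted hheap hmin
      intro y hy; have := hall y hy; omega
    obtain ⟨c, t, hst⟩ :
        ∃ c t, PySem.List.sorted rem.flatten (fun x => x) true = c :: t := by
      have hne : PySem.List.sorted rem.flatten (fun x => x) true ≠ [] := by
        rw [Ne, PySem.List.sorted_eq_nil_iff]; exact hflat_ne
      obtain ⟨c, t, h⟩ := List.exists_cons_of_ne_nil hne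
      exact ⟨c, t, h⟩
    have hxmem : x ∈ rem.flatten :=
      List.mem_flatten.mpr ⟨rem[j], List.getElem_mem hj, by rw [hxr]; exact List.mem_cons_self⟩
    have hcx : c = x := by
      have h1c : c ∈ rem.flatten := by
        rw [← PySem.List.mem_sorted rem.flatten (fun x => x) true c, hst]
        exact List.mem_cons_self
      have h2c : x ≤ c := PySem.List.key_head_sorted_rev_ge rem.flatten (fun x => x) hst x hxmem
      exact le_antisymm (hmax c h1c) h2c
    have hrem : rem = rem.take j ++ (x :: r) :: rem.drop (j + 1) := by
      conv_lhs => rw [← List.take_append_drop j rem]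
      rw [List.drop_eq_getElem_cons hj, hxr]
    have hset : rem.set j r = rem.take j ++ r :: rem.drop (j + 1) := by
      rw [List.set_eq_take_append_cons_drop, if_pos hj]
    have hlenA : ((rem.take j).length : Int) = (j : Int) := by
      rw [List.length_take_of_le hj.le]
    have hpf : rem.flatten.Perm (x :: (rem.set j r).flatten) := by
      conv_lhs => rw [hrem]
      rw [hset, List.flatten_append, List.flatten_append, List.flatten_cons, List.flatten_cons]
      have hc : (x :: r) ++ (rem.drop (j + 1)).flatten = x :: (r ++ (rem.drop (j + 1)).flatten) := rfl
      rw [hc]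
      have := @List.perm_middle _ x (rem.take j).flatten (r ++ (rem.drop (j + 1)).flatten)
      simp only [← List.append_assoc] at this ⊢; simp only [List.append_assoc] at this ⊢; exact this
    have htperm : t.Perm (rem.set j r).flatten := by
      have hsp : (c :: t).Perm rem.flatten := hst ▸ PySem.List.sorted_perm rem.flatten (fun x => x) true
      have hh := hsp.trans hpf
      rw [hcx] at hh
      exact hh.cons_inv
    have hsorted_t :
        PySem.List.sorted (rem.set j r).flatten (fun x => x) true = t := by
      apply PySem.List.eq_of_perm_of_pairwise_le_of_injective (fun z : Int => -z) neg_injective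
      · exact (PySem.List.sorted_perm _ _ _).trans htperm.symm
      · exact (PySem.List.sorted_pairwise_rev _ _).imp (fun h => by simpa using h)
      · have hp := PySem.List.sorted_pairwise_rev rem.flatten (fun x => x)
        rw [hst] at hp
        exact hp.of_cons.imp (fun h => by simpa using h)
    have hflen : (rem.set j r).flatten.length + 1 = rem.flatten.length := by
      have hl := hpf.length_eq
      rw [List.length_cons] at hl
      omega
    have hsorted' : ∀ l ∈ rem.set j r, l.Pairwise (fun a b => b ≤ a) := by
      intro l hl
      rcases List.mem_or_eq_of_mem_set hl with h | h
      · exact hsorted l h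
      · subst h
        have hp := hsorted rem[j] (List.getElem_mem hj)
        rw [hxr] at hp
        exact hp.of_cons
    have hheap1 : ((h0 :: hs).erase (-x, (j : Int))).Perm
        ((PySem.List.enumerate (rem.take j) 0).filterMap (fun p => p.2.head?.map (fun x => (-x, p.1)))
         ++ (PySem.List.enumerate (rem.drop (j + 1)) ((j : Int) + 1)).filterMap
              (fun p => p.2.head?.map (fun x => (-x, p.1)))) := by
      have hsplit := pvFronts_split (rem.take j) (rem.drop (j + 1)) (x :: r)
      rw [← hrem, hlenA] at hsplit
      simp only [List.head?_cons, Option.map_some, Option.toList_some] at hsplit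
      have hh : (h0 :: hs).Perm ((-x, (j : Int)) ::
          ((PySem.List.enumerate (rem.take j) 0).filterMap (fun p => p.2.head?.map (fun x => (-x, p.1)))
           ++ (PySem.List.enumerate (rem.drop (j + 1)) ((j : Int) + 1)).filterMap
                (fun p => p.2.head?.map (fun x => (-x, p.1))))) := by
        rw [hsplit] at hheap
        exact hheap.trans (by simp only [List.singleton_append] at *; exact List.perm_middle)
      have he := hh.erase (a := (-x, (j : Int)))
      rw [List.erase_cons_head] at he
      exact he
    cases n with
    | zero =>
      simp only [pvKthLoop, hmin, hst]
      rw [hcx]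
      simp
    | succ m =>
      rw [pvKthLoop.eq_def]
      simp only [hmin, hget, List.tail_cons]
      cases r with
      | nil =>
        have hfr : pvFronts (rem.set j []) =
            ((PySem.List.enumerate (rem.take j) 0).filterMap (fun p => p.2.head?.map (fun x => (-x, p.1)))
             ++ (PySem.List.enumerate (rem.drop (j + 1)) ((j : Int) + 1)).filterMap
                  (fun p => p.2.head?.map (fun x => (-x, p.1)))) := by
          have hsplit := pvFronts_split (rem.take j) (rem.drop (j + 1)) []
          rw [← hset, hlenA] at hsplit
          simpa using hsplit
        simp only [Int.toNat_natCast]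
        show pvKthLoop (m + 1) (rem.set j []) ((h0 :: hs).erase (-x, (j : Int))) =
          some ((PySem.List.sorted rem.flatten (fun x => x) true).getD (m + 1 + 1 - 1) 0)
        rw [ih (rem.set j []) _ hsorted' (by rw [hfr]; exact hheap1) (by omega) (by omega)]
        rw [hsorted_t, hst]
        simp
      | cons y r2 =>
        have hfr : pvFronts (rem.set j (y :: r2)) =
            ((PySem.List.enumerate (rem.take j) 0).filterMap (fun p => p.2.head?.map (fun x => (-x, p.1)))
             ++ ([(-y, (j : Int))]
             ++ (PySem.List.enumerate (rem.drop (j + 1)) ((j : Int) + 1)).filterMap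
                  (fun p => p.2.head?.map (fun x => (-x, p.1))))) := by
          have hsplit := pvFronts_split (rem.take j) (rem.drop (j + 1)) (y :: r2)
          rw [← hset, hlenA] at hsplit
          simpa using hsplit
        have hperm : ((h0 :: hs).erase (-x, (j : Int)) ++ [(-y, (j : Int))]).Perm
            (pvFronts (rem.set j (y :: r2))) := by
          rw [hfr]
          refine (List.Perm.append_right [(-y, (j : Int))] hheap1).trans ?_
          refine (List.perm_append_singleton _ _).trans ?_
          simpa using List.perm_middle.symm
        simp only [Int.toNat_natCast]
        show pvKthLoop (m + 1) (rem.set j (y :: r2)) ((h0 :: hs).erase (-x, (j : Int)) ++ [(-y, (j : Int))]) =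
          some ((PySem.List.sorted rem.flatten (fun x => x) true).getD (m + 1 + 1 - 1) 0)
        rw [ih (rem.set j (y :: r2)) _ hsorted' hperm (by omega) (by omega)]
        rw [hsorted_t, hst]
        simp

theorem pvFlattenSortedPerm (arrays : List (List Int)) :
    (arrays.map (fun a => PySem.List.sorted a (fun x => x) true)).flatten.Perm arrays.flatten := by
  induction arrays with
  | nil => simp
  | cons a rest ih =>
    simp only [List.map_cons, List.flatten_cons]
    exact (PySem.List.sorted_perm a (fun x => x) true).append ih

theorem pvSortedAgree (arrays : List (List Int)) :
    PySem.List.sorted (arrays.map (fun a => PySem.List.sorted a (fun x => x) true)).flatten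
      (fun x => x) true
    = PySem.List.sorted arrays.flatten (fun x => x) true := by
  apply PySem.List.eq_of_perm_of_pairwise_le_of_injective (fun z : Int => -z) neg_injective
  · exact ((PySem.List.sorted_perm _ _ _).trans (pvFlattenSortedPerm arrays)).trans
      (PySem.List.sorted_perm _ _ _).symm
  · exact (PySem.List.sorted_pairwise_rev _ _).imp (fun h => by simpa using h)
  · exact (PySem.List.sorted_pairwise_rev _ _).imp (fun h => by simpa using h)

theorem pvLen (arrays : List (List Int)) :
    ((arrays.map (fun a => PySem.List.sorted a (fun x => x) true)).flatten.length : Int)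
      = (arrays.map (fun a => (a.length : Int))).sum := by
  induction arrays with
  | nil => simp
  | cons a rest ih =>
    simp only [List.map_cons, List.flatten_cons, List.sum_cons, List.length_append]
    push_cast
    rw [← ih]
    simp [PySem.List.length_sorted]

theorem pvFinal (arrays : List (List Int)) (k : Int)
    (h1 : 1 ≤ k) (h2 : k ≤ (arrays.map (fun a => (a.length : Int))).sum) :
    KthInArrays arrays k = KthInArrays_alt arrays k := by
  show (pvKthLoop k.toNat (arrays.map (fun a => PySem.List.sorted a (fun x => x) true))
      (pvFronts (arrays.map (fun a => PySem.List.sorted a (fun x => x) true)))).getD 0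
    = (PySem.List.pyGet? (PySem.List.sorted (arrays.flatMap (fun arr => arr)) (fun x => x) true)
        (k - 1)).getD 0
  have hlen := pvLen arrays
  have hsorted0 : ∀ l ∈ arrays.map (fun a => PySem.List.sorted a (fun x => x) true),
      l.Pairwise (fun a b => b ≤ a) := by
    intro l hl
    obtain ⟨a, _, rfl⟩ := List.mem_map.mp hl
    exact PySem.List.sorted_pairwise_rev a (fun x => x)
  have hkn1 : 1 ≤ k.toNat := by omega
  have hkn2 : k.toNat ≤ (arrays.map (fun a => PySem.List.sorted a (fun x => x) true)).flatten.length := by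
    omega
  rw [pvLoop_spec k.toNat _ _ hsorted0 (List.Perm.refl _) hkn1 hkn2]
  rw [pvSortedAgree]
  have hflatmap : arrays.flatMap (fun arr => arr) = arrays.flatten := by
    simp [List.flatMap_def]
  rw [hflatmap]
  set flat := PySem.List.sorted arrays.flatten (fun x => x) true with hflat
  have hflatlen : (flat.length : Int) = (arrays.map (fun a => (a.length : Int))).sum := by
    rw [hflat, PySem.List.length_sorted]
    have := (pvFlattenSortedPerm arrays).length_eq
    omega
  have hidx : (k - 1).toNat < flat.length := by omega
  rw [PySem.List.pyGet?_of_nonneg _ (by omega : (0:Int) ≤ k - 1)]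
  rw [List.getElem?_eq_getElem hidx]
  have : k.toNat - 1 = (k - 1).toNat := by omega
  rw [Option.getD_some, this, List.getD_eq_getElem?_getD, List.getElem?_eq_getElem hidx,
    Option.getD_some]

-- ===== VERDICT (by name: the statement is the Claim_ definition above) =====
theorem KthInArrays_spec : Claim_equal_KthInArrays := by
  intro arrays k _ hpre
  unfold Pre_KthInArrays at hpre
  unfold Spec_KthInArrays
  exact pvFinal arrays k hpre.1 hpre.2
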